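-- pv_equiv track=rewrite | github.com/sp-mzhang/ultra-rpi | scripts/probe_markers_stream.py | _tile_slices
-- ===== SOURCE A (Python) =====
-- def _tile_slices(
--     h: int, w: int, rows: int, cols: int, overlap_px: int,
-- ) -> list[tuple[int, int, int, int]]:
--     """Return ``(y0, y1, x0, x1)`` tile rects covering ``h x w``
--     with ``overlap_px`` shared with each inner neighbour. Mirrors
--     ``ultra.vision.carousel_align._tile_slices``."""
--     rows = max(1, int(rows))
--     cols = max(1, int(cols))
--     overlap_px = max(0, int(overlap_px))
--     if rows == 1 and cols == 1:
--         return [(0, h, 0, w)]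
--     tile_h = h // rows
--     tile_w = w // cols
--     slices: list[tuple[int, int, int, int]] = []
--     for r in range(rows):
--         for c in range(cols):
--             y0 = max(0, r * tile_h - overlap_px)
--             y1 = h if r == rows - 1 else min(
--                 h, (r + 1) * tile_h + overlap_px,
--             )
--             x0 = max(0, c * tile_w - overlap_px)
--             x1 = w if c == cols - 1 else min(
--                 w, (c + 1) * tile_w + overlap_px,
--             )
--             slices.append((y0, y1, x0, x1))
--     return slices
-- ===== SOURCE B (Python) =====
-- def _tile_slices(h, w, rows, cols, overlap_px):
--     rows = max(1, int(rows))
--     cols = max(1, int(cols))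
--     ov = max(0, int(overlap_px))
--
--     def bands(total, n):
--         # cut positions of the non-overlapping partition, by running accumulation,
--         # with the last cut pinned to the image edge
--         step = total // n
--         cuts = [0]
--         y = 0
--         for _ in range(n):
--             y += step
--             cuts.append(y)
--         cuts[-1] = total
--         # dilate every band by the overlap and clamp, then pin the last band's
--         # far edge back to the image edge
--         dil = [(max(0, a - ov), min(total, b + ov)) for a, b in zip(cuts, cuts[1:])]
--         dil[-1] = (dil[-1][0], total)
--         return dil
--
--     yb = bands(h, rows)
--     xb = bands(w, cols)
--     # one flat pass: tile i is row i // cols, column i % cols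
--     return [yb[i // cols] + xb[i % cols] for i in range(rows * cols)]
-- ===== Notes on version B (the rewrite author's own statement) =====
-- stated objective: alternative
-- what changed: B builds each axis's bands by a staged pipeline - cut positions of the non-overlapping partition by running accumulation, a dilate-by-overlap-and-clamp pass, then pinning the last band back to the image edge - and emits the tiles in one flat pass over range(rows*cols), concatenating the two band pairs looked up via i//cols and i%cols; A recomputes both bounds from closed formulas inside nested row/column loops with a rows==1&&cols==1 special case.
import Mathlib
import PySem

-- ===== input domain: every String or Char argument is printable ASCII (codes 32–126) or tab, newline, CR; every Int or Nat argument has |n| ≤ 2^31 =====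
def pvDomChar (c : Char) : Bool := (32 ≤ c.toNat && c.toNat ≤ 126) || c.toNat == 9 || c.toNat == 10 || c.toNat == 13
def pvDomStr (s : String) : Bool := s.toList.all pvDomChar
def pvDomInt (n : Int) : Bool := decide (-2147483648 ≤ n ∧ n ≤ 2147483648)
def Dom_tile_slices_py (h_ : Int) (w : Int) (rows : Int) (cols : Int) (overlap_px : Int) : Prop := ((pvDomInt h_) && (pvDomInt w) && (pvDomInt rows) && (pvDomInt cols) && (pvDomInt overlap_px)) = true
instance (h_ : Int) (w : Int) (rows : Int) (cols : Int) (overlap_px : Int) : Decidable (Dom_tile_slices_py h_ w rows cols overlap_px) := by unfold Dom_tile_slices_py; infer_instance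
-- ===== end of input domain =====

-- B builds each axis's bands by a staged partition/dilate/pin pipeline and emits the
-- tiles in one flat divmod loop; alternative decomposition, same values and cost.
-- ===== PORT A =====
def tile_slices_py (h_ : Int) (w : Int) (rows : Int) (cols : Int) (overlap_px : Int) : List (Int × Int × Int × Int) :=
  let rows := max 1 rows
  let cols := max 1 cols
  let overlap_px := max 0 overlap_px
  if rows = 1 ∧ cols = 1 then [(0, h_, 0, w)] else
  let tile_h := PySem.Int.floordiv h_ rows
  let tile_w := PySem.Int.floordiv w cols
  (PySem.List.pyRange 0 rows 1).foldl (fun slices r =>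
    (PySem.List.pyRange 0 cols 1).foldl (fun slices c =>
      slices ++ [(max 0 (r * tile_h - overlap_px),
                  if r = rows - 1 then h_ else min h_ ((r + 1) * tile_h + overlap_px),
                  max 0 (c * tile_w - overlap_px),
                  if c = cols - 1 then w else min w ((c + 1) * tile_w + overlap_px))]) slices) []

-- ===== PORT B =====
-- helper 'bands' of Source B: cuts by running accumulation, dilate each band, pin the last edge
def pvBands (total : Int) (n : Int) (ov : Int) : List (Int × Int) :=
  let step := PySem.Int.floordiv total n
  let st := (PySem.List.pyRange 0 n 1).foldl
      (fun (s : List Int × Int) _ => (s.1 ++ [s.2 + step], s.2 + step)) ([0], 0)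
  -- cuts[-1] = total : the cuts list is nonempty (it starts as [0]), so this is exact
  let cuts := st.1.dropLast ++ [total]
  -- zip(cuts, cuts[1:]) then the dilation comprehension
  let dil := (cuts.zip (PySem.List.slice cuts (some 1) none)).map
      (fun ab => (max 0 (ab.1 - ov), min total (ab.2 + ov)))
  -- dil[-1] = (dil[-1][0], total): Python raises on an empty dil (unreachable: n ≥ 1 at the call sites)
  match dil.getLast? with
  | none => dil
  | some p => dil.dropLast ++ [(p.1, total)]

def tile_slices_py_alt (h_ : Int) (w : Int) (rows : Int) (cols : Int) (overlap_px : Int) : List (Int × Int × Int × Int) :=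
  let rows := max 1 rows
  let cols := max 1 cols
  let ov := max 0 overlap_px
  let yb := pvBands h_ rows ov
  let xb := pvBands w cols ov
  -- one flat pass: yb[i // cols] + xb[i % cols] (Python tuple concatenation of two
  -- pairs = the 4-tuple); the lookups are always in range (0 ≤ i // cols < rows = len yb,
  -- 0 ≤ i % cols < cols = len xb), so the getD default is never read
  (PySem.List.pyRange 0 (rows * cols) 1).foldl (fun out i =>
    let y := PySem.List.pyGetD yb (PySem.Int.floordiv i cols) (0, 0)
    let x := PySem.List.pyGetD xb (PySem.Int.mod i cols) (0, 0)
    out ++ [(y.1, y.2, x.1, x.2)]) []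

-- ===== PRECONDITION & SPEC =====
def Spec_tile_slices_py (h_ : Int) (w : Int) (rows : Int) (cols : Int) (overlap_px : Int) (out : List (Int × Int × Int × Int)) : Prop := out = tile_slices_py_alt h_ w rows cols overlap_px
instance (h_ : Int) (w : Int) (rows : Int) (cols : Int) (overlap_px : Int) (out : List (Int × Int × Int × Int)) : Decidable (Spec_tile_slices_py h_ w rows cols overlap_px out) := by unfold Spec_tile_slices_py; infer_instance

-- ===== CLAIM =====
def Claim_equal_tile_slices_py : Prop := ∀ (h_ : Int) (w : Int) (rows : Int) (cols : Int) (overlap_px : Int), Dom_tile_slices_py h_ w rows cols overlap_px → Spec_tile_slices_py h_ w rows cols overlap_px (tile_slices_py h_ w rows cols overlap_px)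

-- ===== LEMMAS AND PROOFS =====

-- the canonical band value both programs compute (proof-only helper)
def pvBand (total step ov : Int) (m : Nat) (k : Nat) : Int × Int :=
  (max 0 ((k : Int) * step - ov), if k = m - 1 then total else min total (((k : Int) + 1) * step + ov))

-- the canonical tile list (proof-only helper)
def pvCanon (h_ w rows cols ov : Int) : List (Int × Int × Int × Int) :=
  (List.range rows.toNat).flatMap (fun r =>
    (List.range cols.toNat).map (fun c =>
      ((pvBand h_ (PySem.Int.floordiv h_ rows) ov rows.toNat r).1,
       (pvBand h_ (PySem.Int.floordiv h_ rows) ov rows.toNat r).2,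
       (pvBand w (PySem.Int.floordiv w cols) ov cols.toNat c).1,
       (pvBand w (PySem.Int.floordiv w cols) ov cols.toNat c).2)))

theorem pv_cuts_fold (step : Int) (l : List Int) (c0 : List Int) (y0 : Int) :
    l.foldl (fun (s : List Int × Int) _ => (s.1 ++ [s.2 + step], s.2 + step)) (c0, y0)
    = (c0 ++ (List.range l.length).map (fun (k : Nat) => y0 + ((k : Int) + 1) * step),
       y0 + (l.length : Int) * step) := by
  induction l generalizing c0 y0 with
  | nil => simp
  | cons a t ih =>
    simp only [List.foldl_cons, ih, List.length_cons]
    rw [Prod.mk.injEq]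
    refine ⟨?_, by push_cast; ring⟩
    rw [List.append_assoc]
    congr 1
    rw [List.range_succ_eq_map, List.map_cons, List.map_map, List.singleton_append]
    congr 1
    · push_cast; ring
    · refine List.map_congr_left (fun k _ => ?_)
      simp only [Function.comp_apply]
      push_cast; ring

theorem pv_bands_core (total ov step : Int) (m : Nat) (hm : 1 ≤ m) :
    (let cuts := ([0] ++ (List.range m).map fun (k : Nat) => 0 + ((k : Int) + 1) * step).dropLast ++ [total]
     let dil := (cuts.zip (PySem.List.slice cuts (some 1) none)).map
        (fun ab => (max 0 (ab.1 - ov), min total (ab.2 + ov)))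
     match dil.getLast? with
     | none => dil
     | some p => dil.dropLast ++ [(p.1, total)])
    = (List.range m).map (pvBand total step ov m) := by
  simp only [PySem.List.slice_from_one]
  set L := ([0] ++ (List.range m).map fun (k : Nat) => 0 + ((k : Int) + 1) * step).dropLast ++ [total]
    with hLdef
  have hLlen : L.length = m + 1 := by simp [hLdef]
  have hLk : ∀ (k : Nat) (hk : k < m + 1), L[k]'(by omega)
      = if k < m then (k : Int) * step else total := by
    intro k hk
    simp only [hLdef]
    rw [List.getElem_append]
    by_cases h' : k < m
    · rw [dif_pos (by simpa using h')]
      rw [List.getElem_dropLast]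
      rcases Nat.eq_zero_or_pos k with hk0 | hk1
      · subst hk0
        rw [if_pos h']
        simp
      · rw [List.getElem_append_right (by simpa using hk1)]
        simp only [List.getElem_map, List.getElem_range, List.length_singleton]
        have hc : ((k - 1 : Nat) : Int) = (k : Int) - 1 := by omega
        rw [hc, if_pos h']
        ring
    · have hkm : k = m := by omega
      subst hkm
      rw [dif_neg (by simpa using h')]
      simp [h']
  set dil := (L.zip L.tail).map (fun ab => (max 0 (ab.1 - ov), min total (ab.2 + ov)))
    with hdil
  have hdlen : dil.length = m := by
    simp [hdil, List.length_zip, List.length_tail, hLlen]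
  have hdk : ∀ (k : Nat) (hk : k < m), dil[k]'(by omega)
      = (max 0 ((k : Int) * step - ov),
         min total ((if k + 1 < m then ((k : Int) + 1) * step else total) + ov)) := by
    intro k hk
    simp only [hdil, List.getElem_map, List.getElem_zip]
    rw [List.getElem_tail, hLk k (by omega), hLk (k + 1) (by omega)]
    rw [if_pos hk]
    by_cases h2 : k + 1 < m
    · rw [if_pos h2, if_pos h2]
      push_cast; ring_nf
    · rw [if_neg h2, if_neg h2]
  have hlast : dil.getLast? = dil[m - 1]? := by
    rw [List.getLast?_eq_getElem?, hdlen]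
  have hsome : dil[m - 1]? = some (dil[m - 1]'(by omega)) :=
    List.getElem?_eq_getElem (by omega)
  rw [hlast, hsome]
  apply List.ext_getElem
  · simp only [List.length_append, List.length_dropLast, hdlen, List.length_map,
      List.length_range, List.length_singleton]
    omega
  · intro k h1 h2
    simp only [List.length_append, List.length_dropLast, hdlen, List.length_map,
      List.length_range, List.length_singleton] at h1 h2
    by_cases hk : k < m - 1
    · rw [List.getElem_append_left (by simp [hdlen]; omega)]
      rw [List.getElem_dropLast, hdk k (by omega)]
      simp only [List.getElem_map, List.getElem_range, pvBand]
      have h1' : k + 1 < m := by omega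
      have h2' : ¬ (k = m - 1) := by omega
      rw [if_pos h1', if_neg h2']
    · have hkm : k = m - 1 := by omega
      subst hkm
      rw [List.getElem_append_right (by simp [hdlen])]
      simp only [List.length_dropLast, hdlen]
      simp only [List.getElem_map, List.getElem_range, pvBand]
      have hz : m - 1 - (m - 1) = 0 := by omega
      simp only [hz, List.getElem_singleton]
      rw [hdk (m - 1) (by omega)]
      simp

theorem pv_bands_eq (total ov n : Int) (hn : 1 ≤ n) :
    pvBands total n ov
      = (List.range n.toNat).map (pvBand total (PySem.Int.floordiv total n) ov n.toNat) := by
  have hm : 1 ≤ n.toNat := by omega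
  simp only [pvBands]
  rw [PySem.List.pyRange_zero, pv_cuts_fold]
  simp only [List.length_map, List.length_range]
  exact pv_bands_core total ov (PySem.Int.floordiv total n) n.toNat hm

-- row-major flattening of the flat divmod loop (Nat level)
theorem pv_range_mul {A : Type} (Rn Cn : Nat) (hC : 0 < Cn) (f : Nat → Nat → A) :
    (List.range (Rn * Cn)).map (fun i => f (i / Cn) (i % Cn))
    = (List.range Rn).flatMap (fun r => (List.range Cn).map (fun c => f r c)) := by
  induction Rn with
  | zero => simp
  | succ R ih =>
    rw [Nat.succ_mul, List.range_add, List.map_append, ih, List.range_succ,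
      List.flatMap_append]
    congr 1
    simp only [List.flatMap_cons, List.flatMap_nil, List.append_nil, List.map_map,
      Function.comp_def]
    refine List.map_congr_left (fun c hc => ?_)
    rw [List.mem_range] at hc
    rw [show R * Cn + c = c + Cn * R by ring, Nat.add_mul_div_left _ _ hC,
      Nat.add_mul_mod_self_left, Nat.div_eq_of_lt hc, Nat.mod_eq_of_lt hc,
      Nat.zero_add]

theorem pv_alt_eq_canon (h_ w rows cols ov0 : Int) :
    tile_slices_py_alt h_ w rows cols ov0
      = pvCanon h_ w (max 1 rows) (max 1 cols) (max 0 ov0) := by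
  simp only [tile_slices_py_alt]
  set R := max 1 rows with hRdef
  set C := max 1 cols with hCdef
  set ov := max 0 ov0 with hovdef
  have hR : 1 ≤ R := le_max_left 1 rows
  have hC : 1 ≤ C := le_max_left 1 cols
  rw [pv_bands_eq h_ ov R hR, pv_bands_eq w ov C hC,
    PySem.List.foldl_append_singleton_eq_map]
  rw [show R * C = ((R.toNat * C.toNat : Nat) : Int) by
    push_cast
    rw [Int.toNat_of_nonneg (by omega), Int.toNat_of_nonneg (by omega)]]
  rw [PySem.List.pyRange_zero_nat, List.map_map, List.nil_append]
  have hCn : C = ((C.toNat : Nat) : Int) := (Int.toNat_of_nonneg (by omega)).symm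
  simp only [pvCanon]
  rw [← pv_range_mul R.toNat C.toNat (by omega : 0 < C.toNat)]
  refine List.map_congr_left (fun i hi => ?_)
  rw [List.mem_range] at hi
  have hdiv : i / C.toNat < R.toNat := (Nat.div_lt_iff_lt_mul (by omega)).2 hi
  have hmod : i % C.toNat < C.toNat := Nat.mod_lt _ (by omega)
  simp only [Function.comp_apply]
  rw [show PySem.Int.floordiv (↑i) C = ((i / C.toNat : Nat) : Int) by
        rw [hCn, PySem.Int.floordiv_natCast]; simp,
      show PySem.Int.mod (↑i) C = ((i % C.toNat : Nat) : Int) by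
        rw [hCn, PySem.Int.mod_natCast]; simp]
  simp only [PySem.List.pyGetD_natCast]
  rw [PySem.List.getD_map_range _ _ _ _ hdiv, PySem.List.getD_map_range _ _ _ _ hmod]

theorem pv_a_eq_canon (h_ w rows cols ov0 : Int) :
    tile_slices_py h_ w rows cols ov0
      = pvCanon h_ w (max 1 rows) (max 1 cols) (max 0 ov0) := by
  simp only [tile_slices_py]
  set R := max 1 rows with hRdef
  set C := max 1 cols with hCdef
  set ov := max 0 ov0 with hovdef
  have hR : 1 ≤ R := le_max_left 1 rows
  have hC : 1 ≤ C := le_max_left 1 cols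
  have hov : 0 ≤ ov := le_max_left 0 ov0
  by_cases hsp : R = 1 ∧ C = 1
  · rw [if_pos hsp]
    obtain ⟨h1, h2⟩ := hsp
    rw [h1, h2]
    have hmax : max (0 : Int) (-ov) = 0 := by omega
    simp [pvCanon, pvBand, hmax]
  · rw [if_neg hsp]
    simp only [PySem.List.foldl_append_singleton_eq_map,
      PySem.List.foldl_append_eq_flatMap, List.nil_append]
    simp only [PySem.List.pyRange_zero, List.flatMap_map, List.map_map]
    simp only [pvCanon]
    refine List.flatMap_congr (fun r hr => ?_)
    rw [List.mem_range] at hr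
    refine List.map_congr_left (fun c hc => ?_)
    rw [List.mem_range] at hc
    have hiffr : ((r : Int) = R - 1) ↔ (r = R.toNat - 1) := by
      constructor <;> (intro; omega)
    have hiffc : ((c : Int) = C - 1) ↔ (c = C.toNat - 1) := by
      constructor <;> (intro; omega)
    simp [pvBand, hiffr, hiffc]

-- ===== VERDICT (by name: the statement is the Claim_ definition above) =====
theorem tile_slices_py_spec : Claim_equal_tile_slices_py := by
  intro h_ w rows cols overlap_px _
  unfold Spec_tile_slices_py
  rw [pv_a_eq_canon, pv_alt_eq_canon]
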